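-- pv_equiv track=rewrite | github.com/JBarmada/asm-to-asm | CompareRet-Mctoll.py | format_problem_list
-- ===== SOURCE A (Python) =====
-- from typing import Dict, List, Set, Tuple
--
-- def format_problem_list(problems: List[str], per_line: int = 10) -> str:
--     """Format a list of problems for display."""
--     if not problems:
--         return "None"
--
--     # Group problems for better readability
--     lines = []
--     for i in range(0, len(problems), per_line):
--         line_problems = problems[i:i + per_line]
--         lines.append(", ".join(line_problems))
--
--     return "\n     ".join(lines)
-- ===== SOURCE B (Python) =====
-- def format_problem_list(problems, per_line=10):
--     """Format a list of problems for display."""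
--     if not problems:
--         return "None"
--     out = problems[0]
--     for i in range(1, len(problems)):
--         out += "\n     " if i % per_line == 0 else ", "
--         out += problems[i]
--     return out
-- ===== Notes on version B (the rewrite author's own statement) =====
-- stated objective: simpler
-- what changed: A builds a list of per-chunk strings by slicing problems[i:i+per_line] over a stepped range and then joins the inner joins with the line separator; B makes a single pass over the indices, appending each element after a separator chosen by i % per_line, with no intermediate list, slices or joins.
-- outside the precondition, e.g. on format_problem_list(['a', 'b', 'c'], -2): A returns '', B returns 'a, b\n     c'; on format_problem_list(['a'], 0): A raises ValueError, B returns 'a'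
import Mathlib
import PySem

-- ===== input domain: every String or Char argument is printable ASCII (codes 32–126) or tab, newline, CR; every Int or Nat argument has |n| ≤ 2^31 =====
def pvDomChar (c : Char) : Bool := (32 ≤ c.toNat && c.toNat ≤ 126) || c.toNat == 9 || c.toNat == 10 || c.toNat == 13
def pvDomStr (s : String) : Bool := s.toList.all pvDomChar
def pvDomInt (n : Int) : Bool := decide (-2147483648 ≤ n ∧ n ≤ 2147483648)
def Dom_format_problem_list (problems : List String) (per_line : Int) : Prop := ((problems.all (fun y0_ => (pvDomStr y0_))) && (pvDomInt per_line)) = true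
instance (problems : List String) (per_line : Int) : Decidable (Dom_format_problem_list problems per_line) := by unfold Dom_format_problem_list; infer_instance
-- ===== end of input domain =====

-- B replaces A's chunk-slicing two-phase build (list of joined slices, then joined) by a single
-- index pass that appends each element after a separator chosen by i % per_line (objective: simpler).

-- ===== PORT A =====
def format_problem_list (problems : List String) (per_line : Int) : String :=
  if problems = [] then "None"
  else
    let lines : List String :=
      (PySem.List.pyRange 0 (PySem.List.len problems) per_line).foldl
        (fun lines i =>
          let line_problems := PySem.List.slice problems (some i) (some (i + per_line))
          lines ++ [PySem.Str.join ", " line_problems])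
        []
    PySem.Str.join "\n     " lines

-- ===== PORT B =====
def format_problem_list_alt (problems : List String) (per_line : Int) : String :=
  match problems with
  | [] => "None"
  | p0 :: _ =>
    (PySem.List.pyRange 1 (PySem.List.len problems)).foldl
      (fun out i =>
        out ++ (if PySem.Int.mod i per_line = 0 then "\n     " else ", ")
            ++ PySem.List.pyGetD problems i "")
      p0

-- ===== PRECONDITION & SPEC =====
-- Pre_ excludes per_line ≤ 0 with a nonempty list: there Python A raises ValueError (per_line = 0)
-- or returns '' from an empty range (per_line < 0, an accident of range()), both outside the
-- function's natural domain of a positive group width.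
def Pre_format_problem_list (problems : List String) (per_line : Int) : Prop :=
  problems = [] ∨ 1 ≤ per_line
instance (problems : List String) (per_line : Int) : Decidable (Pre_format_problem_list problems per_line) := by unfold Pre_format_problem_list; infer_instance
def pvWitness_format_problem_list : List String × Int := (["alpha", "beta", "gamma"], 2)

def Spec_format_problem_list (problems : List String) (per_line : Int) (out : String) : Prop := out = format_problem_list_alt problems per_line
instance (problems : List String) (per_line : Int) (out : String) : Decidable (Spec_format_problem_list problems per_line out) := by unfold Spec_format_problem_list; infer_instance

-- ===== CLAIM (what is proved, stated in full; the proofs are below) =====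
def Claim_equal_format_problem_list : Prop := ∀ (problems : List String) (per_line : Int), Dom_format_problem_list problems per_line → Pre_format_problem_list problems per_line → Spec_format_problem_list problems per_line (format_problem_list problems per_line)

-- ===== LEMMAS AND PROOFS =====

-- range(a, b, s) with 0 < s and a < b starts with a
theorem pvRange_pos_cons (a b s : Int) (hs : 0 < s) (hab : a < b) :
    PySem.List.pyRange a b s = a :: PySem.List.pyRange (a + s) b s := by
  have hs0 : s ≠ 0 := by omega
  have hdiv : (b - a + s - 1) / s = (b - a - 1) / s + 1 := by
    have h := Int.add_mul_ediv_right (b - a - 1) 1 hs0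
    rw [one_mul] at h
    rw [show b - a + s - 1 = b - a - 1 + s by ring, h]
  have hnn : 0 ≤ (b - a - 1) / s := Int.ediv_nonneg (by omega) (by omega)
  by_cases hab2 : a + s < b
  · have hdiv2 : (b - (a + s) + s - 1) / s = (b - a - 1) / s := by ring_nf
    simp only [PySem.List.pyRange, hs0, if_false, hs, if_pos, hab, hab2, hdiv, hdiv2]
    rw [show ((b - a - 1) / s + 1).toNat = ((b-a-1)/s).toNat + 1 by omega, List.range_succ_eq_map]
    simp only [List.map_cons, List.map_map]
    congr 1
    · simp
    apply List.map_congr_left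
    intro k _
    simp [Nat.succ_eq_add_one]
    ring
  · have h0 : (b - a - 1) / s = 0 := Int.ediv_eq_zero_of_lt (by omega) (by omega)
    simp only [PySem.List.pyRange, hs0, if_false, hs, if_pos, hab, hdiv, h0]
    have hn : ¬ (a + s < b) := hab2
    simp [hn, List.range_succ]

-- shifting both bounds shifts the elements
theorem pvRange_pos_shift (a b c s : Int) (hs : 0 < s) :
    PySem.List.pyRange (a + c) (b + c) s = (PySem.List.pyRange a b s).map (· + c) := by
  have hs0 : s ≠ 0 := by omega
  have hiff : a + c < b + c ↔ a < b := by omega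
  simp only [PySem.List.pyRange, hs0, if_false, hs, if_pos,
    show b + c - (a + c) = b - a by ring, List.map_map]
  by_cases hab : a < b
  · simp only [hab, hiff.mpr hab, if_pos]
    apply List.map_congr_left
    intro k _
    simp; ring
  · simp [hab, hiff]

-- folding "acc ++ g i" distributes over a left prefix of the accumulator
theorem pvFoldl_append_prefix {α : Type} (g : α → String) :
    ∀ (r : List α) (p a : String),
      r.foldl (fun acc i => acc ++ g i) (p ++ a) = p ++ r.foldl (fun acc i => acc ++ g i) a := by
  intro r
  induction r with
  | nil => intro p a; rfl
  | cons x t ih =>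
    intro p a
    simp only [List.foldl_cons, String.append_assoc]
    exact ih p (a ++ g x)

theorem pvStrJoin_singleton (s x : String) : PySem.Str.join s [x] = x := by
  rw [← String.toList_inj]
  simp [PySem.Str.toList_join, PySem.Chars.join, List.intercalate]

theorem pvStrJoin_cons_cons (s x y : String) (t : List String) :
    PySem.Str.join s (x :: y :: t) = x ++ (s ++ PySem.Str.join s (y :: t)) := by
  rw [← String.toList_inj]
  simp [PySem.Str.toList_join, PySem.Chars.join_cons_cons]

theorem pvStrJoin_cons_ne (s x : String) (ys : List String) (h : ys ≠ []) :
    PySem.Str.join s (x :: ys) = x ++ (s ++ PySem.Str.join s ys) := by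
  cases ys with
  | nil => exact absurd rfl h
  | cons y t => exact pvStrJoin_cons_cons s x y t

theorem pvStrJoin_eq_foldl (s : String) : ∀ (ys : List String) (x : String),
    PySem.Str.join s (x :: ys) = ys.foldl (fun a p => a ++ (s ++ p)) x := by
  intro ys
  induction ys with
  | nil => intro x; exact pvStrJoin_singleton s x
  | cons y t ih =>
    intro x
    rw [pvStrJoin_cons_cons, ih y]
    simp only [List.foldl_cons]
    rw [show x ++ (s ++ y) = (x ++ s) ++ y by rw [String.append_assoc],
        pvFoldl_append_prefix (fun p => s ++ p) t (x ++ s) y, String.append_assoc]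

-- A's step: one chunk, then the rest
theorem pvA_step (l : List String) (k : Int) (hk : 1 ≤ k) (hl : l ≠ []) :
    format_problem_list l k =
      if l.drop k.toNat = [] then PySem.Str.join ", " l
      else PySem.Str.join ", " (l.take k.toNat) ++
             ("\n     " ++ format_problem_list (l.drop k.toNat) k) := by
  have hk0 : (0:Int) < k := by omega
  have hkk0 : k ≠ 0 := by omega
  have hlen0 : 0 < l.length := List.length_pos_of_ne_nil hl
  have hn0 : (0:Int) < (l.length:Int) := by exact_mod_cast hlen0
  have hhead : PySem.List.slice l (some 0) (some k) = l.take k.toNat := by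
    rw [PySem.List.slice_toNat l (le_refl (0:Int)) (by omega : (0:Int) ≤ k)]
    simp
  simp only [format_problem_list, if_neg hl, PySem.List.len,
    PySem.List.foldl_append_singleton_eq_map, List.nil_append]
  rw [pvRange_pos_cons 0 _ k hk0 hn0]
  simp only [zero_add, List.map_cons]
  by_cases hd : l.drop k.toNat = []
  · have h1 : l.length ≤ k.toNat := List.drop_eq_nil_iff.mp hd
    have hempty : PySem.List.pyRange k (l.length:Int) k = [] := by
      simp [PySem.List.pyRange, hkk0, hk0, show ¬ ((k:Int) < (l.length:Int)) by omega]
    rw [hempty]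
    simp only [List.map_nil]
    rw [if_pos hd, pvStrJoin_singleton, hhead, List.take_of_length_le h1]
  · have h1 : ¬ l.length ≤ k.toNat := fun h => hd (List.drop_eq_nil_iff.mpr h)
    have hkn : k < (l.length:Int) := by omega
    have hshift : PySem.List.pyRange k (l.length:Int) k
        = (PySem.List.pyRange 0 ((l.length:Int) - k) k).map (· + k) := by
      have h := pvRange_pos_shift 0 ((l.length:Int) - k) k k hk0
      rw [zero_add, sub_add_cancel] at h
      exact h
    rw [hshift, List.map_map]
    rw [List.map_congr_left (g := fun i =>
        PySem.Str.join ", " (PySem.List.slice (l.drop k.toNat) (some i) (some (i + k)))) ?hfun]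
    case hfun =>
      intro i hi
      obtain ⟨hi0, hi1, -⟩ := (PySem.List.mem_pyRange_iff_of_pos hk0 i).mp hi
      simp only [Function.comp_apply]
      congr 1
      rw [PySem.List.slice_toNat l (show (0:Int) ≤ i + k by omega) (show (0:Int) ≤ i + k + k by omega),
          PySem.List.slice_toNat (l.drop k.toNat) (show (0:Int) ≤ i by omega) (show (0:Int) ≤ i + k by omega),
          List.drop_drop]
      congr 1
      · omega
      congr 1
      omega
    have hRcons := pvRange_pos_cons 0 ((l.length:Int) - k) k hk0 (by omega)
    rw [pvStrJoin_cons_ne _ _ _ (by rw [hRcons]; simp), hhead]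
    have hlen' : ((l.drop k.toNat).length : Int) = (l.length:Int) - k := by
      rw [List.length_drop]
      omega
    simp only [if_neg hd, hlen']

-- indices 1..b (b ≤ per_line, b ≤ len) all get the comma separator
theorem pvCommaFold (l : List String) (k b : Int) (hb1 : 1 ≤ b) (hbk : b ≤ k) (hbl : b ≤ (l.length : Int)) (a : String) :
    (PySem.List.pyRange 1 b).foldl (fun out i => out ++
        ((if PySem.Int.mod i k = 0 then "\n     " else ", ") ++ PySem.List.pyGetD l i "")) a
      = ((l.take b.toNat).drop 1).foldl (fun acc p => acc ++ (", " ++ p)) a := by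
  have hmap : (PySem.List.pyRange 1 b).map (fun j => PySem.List.pyGetD l j "")
      = (l.take b.toNat).drop 1 := by
    have hlen : ((l.take b.toNat).length : Int) = b := by
      rw [List.length_take]
      omega
    have h := PySem.List.map_pyGetD_pyRange (l.take b.toNat) "" (a := 1) (by omega)
    rw [PySem.List.len, hlen] at h
    simp only [Int.toNat_one] at h
    rw [← h]
    apply List.map_congr_left
    intro j hj
    obtain ⟨hj0, hj1⟩ := PySem.List.mem_pyRange_one.mp hj
    rw [PySem.List.pyGetD_eq_getElem l "" (by omega) (by omega),
        PySem.List.pyGetD_eq_getElem (l.take b.toNat) "" (by omega) (by rw [List.length_take]; omega)]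
    rw [List.getElem_take]
  rw [← hmap, List.foldl_map]
  apply PySem.List.foldl_congr_mem
  intro acc i hi
  obtain ⟨hi0, hi1⟩ := PySem.List.mem_pyRange_one.mp hi
  have : PySem.Int.mod i k = i := by
    have hkpos : (0:Int) ≤ k := by omega
    simp [PySem.Int.mod, Int.fmod_eq_emod, hkpos]
    exact Int.emod_eq_of_lt (by omega) (by omega)
  rw [this, if_neg (by omega)]

-- B's step: same shape
theorem pvB_step (l : List String) (k : Int) (hk : 1 ≤ k) (hl : l ≠ []) :
    format_problem_list_alt l k =
      if l.drop k.toNat = [] then PySem.Str.join ", " l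
      else PySem.Str.join ", " (l.take k.toNat) ++
             ("\n     " ++ format_problem_list_alt (l.drop k.toNat) k) := by
  have hk0 : (0:Int) < k := by omega
  obtain ⟨x, xs, rfl⟩ := List.exists_cons_of_ne_nil hl
  simp only [format_problem_list_alt, PySem.List.len, String.append_assoc]
  by_cases hd : (x :: xs).drop k.toNat = []
  · have h1 : (x :: xs).length ≤ k.toNat := List.drop_eq_nil_iff.mp hd
    rw [if_pos hd,
        pvCommaFold (x :: xs) k ((x :: xs).length : Int) (by simp) (by omega) le_rfl x,
        List.take_of_length_le (by omega)]
    simp only [List.drop_succ_cons, List.drop_zero]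
    exact (pvStrJoin_eq_foldl ", " xs x).symm
  · have h1 : ¬ (x :: xs).length ≤ k.toNat := fun h => hd (List.drop_eq_nil_iff.mpr h)
    have hkn : k < ((x :: xs).length : Int) := by omega
    rw [if_neg hd,
        PySem.List.pyRange_one_append 1 k ((x :: xs).length : Int) (by omega) (by omega),
        List.foldl_append,
        pvCommaFold (x :: xs) k k (by omega) le_rfl (by omega) x]
    -- name the first-chunk line
    have htake : (x :: xs).take k.toNat = x :: xs.take (k.toNat - 1) := by
      conv_lhs => rw [show k.toNat = (k.toNat - 1) + 1 by omega, List.take_succ_cons]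
    have hline : ((x :: xs).take k.toNat).drop 1 = xs.take (k.toNat - 1) := by
      rw [htake, List.drop_succ_cons, List.drop_zero]
    rw [hline, htake, pvStrJoin_eq_foldl ", "]
    -- the second segment
    have hshift : PySem.List.pyRange k ((x :: xs).length : Int)
        = (PySem.List.pyRange 0 (((x :: xs).length : Int) - k)).map (· + k) := by
      have h := pvRange_pos_shift 0 (((x :: xs).length : Int) - k) k 1 one_pos
      rw [zero_add, sub_add_cancel] at h
      exact h
    rw [hshift, List.foldl_map]
    obtain ⟨y, ys, hys⟩ := List.exists_cons_of_ne_nil hd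
    have hlen' : (((x :: xs).drop k.toNat).length : Int) = ((x :: xs).length : Int) - k := by
      rw [List.length_drop]
      omega
    rw [PySem.List.foldl_congr_mem _ _ (fun out j => out ++
        ((if PySem.Int.mod j k = 0 then "\n     " else ", ")
          ++ PySem.List.pyGetD ((x :: xs).drop k.toNat) j "")) _ ?hg]
    case hg =>
      intro acc j hj
      obtain ⟨hj0, hj1⟩ := PySem.List.mem_pyRange_one.mp hj
      have hmod : PySem.Int.mod (j + k) k = PySem.Int.mod j k := by
        simp [PySem.Int.mod, Int.fmod_eq_emod]
      have hget : PySem.List.pyGetD (x :: xs) (j + k) ""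
          = PySem.List.pyGetD ((x :: xs).drop k.toNat) j "" := by
        rw [PySem.List.pyGetD_eq_getElem (x :: xs) "" (by omega) (by omega),
            PySem.List.pyGetD_eq_getElem ((x :: xs).drop k.toNat) "" hj0 (by omega)]
        rw [List.getElem_drop]
        congr 1
        omega
      rw [hmod, hget]
    rw [show PySem.List.pyRange 0 (((x :: xs).length : Int) - k)
          = 0 :: PySem.List.pyRange 1 (((x :: xs).length : Int) - k) from by
        rw [PySem.List.pyRange_one_cons (by omega)]; norm_num]
    rw [List.foldl_cons]
    have hzero : PySem.Int.mod 0 k = 0 := by simp [PySem.Int.mod]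
    rw [hzero, if_pos rfl]
    have hy : PySem.List.pyGetD ((x :: xs).drop k.toNat) 0 "" = y := by
      rw [PySem.List.pyGetD_eq_getElem ((x :: xs).drop k.toNat) "" le_rfl (by rw [hys]; simp)]
      simp [hys]
    rw [hy]
    rw [show ∀ (a b c : String), a ++ (b ++ c) = (a ++ b) ++ c from fun a b c => (@String.append_assoc a b c).symm]
    rw [pvFoldl_append_prefix _ _ _ y, String.append_assoc]
    congr 1
    congr 1
    -- fold from y over remaining indices = B on the dropped list
    rw [hys]
    rw [← hys, hlen', hys]



theorem pvMain (k : Int) (hk : 1 ≤ k) :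
    ∀ (n : Nat) (l : List String), l.length = n → l ≠ [] →
      format_problem_list l k = format_problem_list_alt l k := by
  intro n
  induction n using Nat.strong_induction_on with
  | _ n ih =>
    intro l hn hl
    rw [pvA_step l k hk hl, pvB_step l k hk hl]
    by_cases hd : l.drop k.toNat = []
    · simp [hd]
    · simp only [if_neg hd]
      have hK : 0 < k.toNat := by omega
      have hlen : (l.drop k.toNat).length < n := by
        subst hn
        rw [List.length_drop]
        have hne : l.length ≠ 0 := fun h => hl (List.eq_nil_of_length_eq_zero h)
        omega
      rw [ih _ hlen _ rfl hd]

-- ===== VERDICT (by name: the statement is the Claim_ definition above) =====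
theorem format_problem_list_spec : Claim_equal_format_problem_list := by
  intro problems per_line _ hpre
  unfold Spec_format_problem_list
  cases problems with
  | nil => simp [format_problem_list, format_problem_list_alt]
  | cons x xs =>
    have hk : 1 ≤ per_line := by
      cases hpre with
      | inl h => exact absurd h (by simp)
      | inr h => exact h
    exact pvMain per_line hk (x :: xs).length (x :: xs) rfl (by simp)
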